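-- pv_equiv track=rewrite | github.com/K2rlXYZ/courses | iti0102-2022 - Python/KT/kt4/exam.py | create_dictionary_from_directed_string_pairs
-- ===== SOURCE A (Python) =====
-- def create_dictionary_from_directed_string_pairs(pairs: list) -> dict:
--     """
--     Create dictionary from directed string pairs.
--
--     One pair consists of two strings and "direction" symbol ("<" or ">").
--     The key is the string which is on the "larger" side,
--     the value is the string which is on the "smaller" side.
--
--     For example:
--     ab>cd => "ab" is the key, "cd" is the value
--     kl<mn => "mn" is the key, "kl" is the value
--
--     The input consists of list of such strings.
--     The output is a dictionary, where values are lists.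
--     Each key cannot contain duplicate elements.
--     The order of the elements in the values should be
--     the same as they appear in the input list.
--
--     create_dictionary_from_directed_string_pairs([]) => {}
--
--     create_dictionary_from_directed_string_pairs(["a>b", "a>c"]) =>
--     {"a": ["b", "c"]}
--
--     create_dictionary_from_directed_string_pairs(["a>b", "a<b"]) =>
--     {"a": ["b"], "b": ["a"]}
--
--     create_dictionary_from_directed_string_pairs(["1>1", "1>2", "1>1"]) =>
--     {"1": ["1", "2"]}
--     """
--     if not pairs:
--         return {}
--     dict = {}
--     for pair in pairs:
--         if ">" in pair:
--             temp = pair.split(">")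
--             if temp[0] not in dict.keys():
--                 dict[temp[0]] = []
--             dict[temp[0]].append(temp[1]) if temp[1] not in dict[temp[0]] else 0
--         elif "<" in pair:
--             temp = pair.split("<")
--             if temp[1] not in dict.keys():
--                 dict[temp[1]] = []
--             dict[temp[1]].append(temp[0]) if temp[0] not in dict[temp[1]] else 0
--     return dict
-- ===== SOURCE B (Python) =====
-- def create_dictionary_from_directed_string_pairs(pairs: list) -> dict:
--     """Edge-list group-by: flatten pairs into a (key, value) edge list, then
--     build the result by scanning that list per distinct key (no incremental dict)."""
--     kvs = []
--     for pair in pairs: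
--         if ">" in pair:
--             t = pair.split(">")
--             kvs.append((t[0], t[1]))
--         elif "<" in pair:
--             t = pair.split("<")
--             kvs.append((t[1], t[0]))
--     return {k: list(dict.fromkeys(v for k2, v in kvs if k2 == k))
--             for k in dict.fromkeys(k for k, _ in kvs)}
-- ===== Notes on version B (the rewrite author's own statement) =====
-- stated objective: alternative
-- what changed: A builds the dict incrementally with per-append membership tests; B never updates a dict during the scan: it first flattens the input into a (key,value) edge list, then groups by scanning that list once per distinct key and deduplicating each group, relying on first-occurrence order of keys.
import Mathlib
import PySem

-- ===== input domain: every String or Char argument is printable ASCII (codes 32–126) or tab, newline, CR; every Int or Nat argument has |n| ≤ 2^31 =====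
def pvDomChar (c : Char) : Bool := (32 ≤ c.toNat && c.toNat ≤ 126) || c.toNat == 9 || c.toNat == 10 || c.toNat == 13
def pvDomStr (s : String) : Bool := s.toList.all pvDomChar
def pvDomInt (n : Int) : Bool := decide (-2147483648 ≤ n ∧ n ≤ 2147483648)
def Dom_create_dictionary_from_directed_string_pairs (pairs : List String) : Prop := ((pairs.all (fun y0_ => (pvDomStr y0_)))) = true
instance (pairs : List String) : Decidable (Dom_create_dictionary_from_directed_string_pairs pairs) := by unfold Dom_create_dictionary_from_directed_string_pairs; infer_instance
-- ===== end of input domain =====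

-- B replaces A's incremental dict with membership-tested appends by a flat (key,value)
-- edge list grouped per distinct key in a second phase (objective: alternative).

-- ===== PORT A =====
def create_dictionary_from_directed_string_pairs (pairs : List String) : List (String × List String) :=
  if pairs = [] then []
  else
    (pairs.foldl (fun d pair =>
      if PySem.Str.isIn ">" pair then
        let temp := (PySem.Str.split? pair ">").getD []   -- sep ≠ "", split? is always some
        let k := PySem.List.pyGetD temp 0 ""              -- temp[0] (never out of range: ">" ∈ pair)
        let v := PySem.List.pyGetD temp 1 ""              -- temp[1]
        let d1 := if d.contains k then d else d.insert k ([] : List String)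
        if (d1.getD k []).contains v then d1 else d1.insert k (d1.getD k [] ++ [v])
      else if PySem.Str.isIn "<" pair then
        let temp := (PySem.Str.split? pair "<").getD []
        let k := PySem.List.pyGetD temp 1 ""
        let v := PySem.List.pyGetD temp 0 ""
        let d1 := if d.contains k then d else d.insert k ([] : List String)
        if (d1.getD k []).contains v then d1 else d1.insert k (d1.getD k [] ++ [v])
      else d) (PySem.Dict.empty : PySem.Dict String (List String))).items

-- ===== PORT B =====
def create_dictionary_from_directed_string_pairs_alt (pairs : List String) : List (String × List String) :=
  let kvs := pairs.foldl (fun acc pair =>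
      if PySem.Str.isIn ">" pair then
        let t := (PySem.Str.split? pair ">").getD []
        acc ++ [(PySem.List.pyGetD t 0 "", PySem.List.pyGetD t 1 "")]
      else if PySem.Str.isIn "<" pair then
        let t := (PySem.Str.split? pair "<").getD []
        acc ++ [(PySem.List.pyGetD t 1 "", PySem.List.pyGetD t 0 "")]
      else acc) ([] : List (String × String))
  (PySem.List.dedup (kvs.map Prod.fst)).map
    (fun k => (k, PySem.List.dedup ((kvs.filter (fun p => p.1 == k)).map Prod.snd)))

-- ===== PRECONDITION & SPEC =====
def Spec_create_dictionary_from_directed_string_pairs (pairs : List String) (out : List (String × List String)) : Prop := out = create_dictionary_from_directed_string_pairs_alt pairs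
instance (pairs : List String) (out : List (String × List String)) : Decidable (Spec_create_dictionary_from_directed_string_pairs pairs out) := by unfold Spec_create_dictionary_from_directed_string_pairs; infer_instance

-- ===== CLAIM (what is proved, stated in full; the proofs are below) =====
def Claim_equal_create_dictionary_from_directed_string_pairs : Prop := ∀ (pairs : List String), Dom_create_dictionary_from_directed_string_pairs pairs → Spec_create_dictionary_from_directed_string_pairs pairs (create_dictionary_from_directed_string_pairs pairs)

-- ===== LEMMAS AND PROOFS =====

-- A's per-(key,value) dictionary step, factored out of the fold body (definitionally equal).
def pvD1 (d : PySem.Dict String (List String)) (k : String) : PySem.Dict String (List String) :=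
  if d.contains k then d else d.insert k ([] : List String)

def pvStepA (d : PySem.Dict String (List String)) (k v : String) : PySem.Dict String (List String) :=
  if ((pvD1 d k).getD k []).contains v then pvD1 d k
  else (pvD1 d k).insert k ((pvD1 d k).getD k [] ++ [v])

-- The invariant relating A's dict to B's edge list during the fold.
def pvR (dA : PySem.Dict String (List String)) (kvs : List (String × String)) : Prop :=
  dA.keys = PySem.List.dedup (kvs.map Prod.fst) ∧
  ∀ k, dA.getD k [] = PySem.List.dedup ((kvs.filter (fun p => p.1 == k)).map Prod.snd)

theorem pv_dedup_append_singleton {α : Type} [BEq α] [LawfulBEq α] (xs : List α) (v : α) :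
    PySem.List.dedup (xs ++ [v]) =
      if (PySem.List.dedup xs).contains v then PySem.List.dedup xs
      else PySem.List.dedup xs ++ [v] := by
  simp [PySem.List.dedup_eq_ofList, PySem.Set.ofList_eq_foldl, List.foldl_append,
    PySem.Set.add, PySem.Set.contains_eq_listContains]

theorem pvD1_getD (dA : PySem.Dict String (List String)) (k k' : String) :
    (pvD1 dA k).getD k' [] = dA.getD k' [] := by
  unfold pvD1
  cases hA : dA.contains k with
  | true => simp
  | false =>
    simp only [Bool.false_eq_true, if_false, PySem.Dict.getD_insert]
    split
    · next he => rw [he, PySem.Dict.getD_of_not_contains dA [] hA]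
    · rfl

theorem pvD1_keys (dA : PySem.Dict String (List String)) (k : String) :
    (pvD1 dA k).keys = if dA.contains k = true then dA.keys else dA.keys ++ [k] := by
  unfold pvD1
  cases hA : dA.contains k with
  | true => simp
  | false =>
    simp only [Bool.false_eq_true, if_false]
    exact PySem.Dict.keys_insert_of_not_contains dA _ hA

theorem pvD1_contains (dA : PySem.Dict String (List String)) (k : String) :
    (pvD1 dA k).contains k = true := by
  unfold pvD1
  cases hA : dA.contains k with
  | true => simpa using hA
  | false => simp

theorem pvStepR (dA : PySem.Dict String (List String)) (kvs : List (String × String))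
    (k v : String) (h : pvR dA kvs) : pvR (pvStepA dA k v) (kvs ++ [(k, v)]) := by
  obtain ⟨h1, h2⟩ := h
  have hc : dA.contains k = (PySem.List.dedup (kvs.map Prod.fst)).contains k := by
    have hmem := PySem.Dict.contains_iff_mem_keys dA k
    rw [h1] at hmem
    cases hA : dA.contains k <;>
      cases hB : (PySem.List.dedup (kvs.map Prod.fst)).contains k <;> simp_all
  have hAkeys : (pvStepA dA k v).keys
      = if dA.contains k = true then dA.keys else dA.keys ++ [k] := by
    unfold pvStepA
    by_cases hin : ((pvD1 dA k).getD k []).contains v = true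
    · rw [if_pos hin]; exact pvD1_keys dA k
    · rw [if_neg hin, PySem.Dict.keys_insert_of_contains _ _ (pvD1_contains dA k)]
      exact pvD1_keys dA k
  refine ⟨?_, ?_⟩
  · rw [hAkeys, List.map_append]
    simp only [List.map_cons, List.map_nil]
    rw [pv_dedup_append_singleton, ← hc, h1]
  · intro k'
    have hfil : (kvs ++ [(k, v)]).filter (fun p => p.1 == k')
        = kvs.filter (fun p => p.1 == k') ++ (if k == k' then [(k, v)] else []) := by
      rw [List.filter_append]
      simp only [List.filter_cons, List.filter_nil]
    by_cases hk' : k' = k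
    · subst hk'
      rw [hfil]
      simp only [BEq.rfl, if_true, List.map_append, List.map_cons, List.map_nil]
      rw [pv_dedup_append_singleton, ← h2 k']
      unfold pvStepA
      simp only [pvD1_getD]
      by_cases hin : (dA.getD k' []).contains v = true
      · rw [if_pos hin, if_pos hin, pvD1_getD]
      · rw [if_neg hin, if_neg hin, PySem.Dict.getD_insert, if_pos rfl]
    · rw [hfil, if_neg (by simpa using fun he => hk' he.symm), List.append_nil, ← h2 k']
      unfold pvStepA
      by_cases hin : ((pvD1 dA k).getD k []).contains v = true
      · rw [if_pos hin]; exact pvD1_getD dA k k'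
      · rw [if_neg hin, PySem.Dict.getD_insert, if_neg hk']
        exact pvD1_getD dA k k'

-- The two fold bodies, named (definitionally equal to the lambdas in the ports).
def pvFA (d : PySem.Dict String (List String)) (pair : String) : PySem.Dict String (List String) :=
  if PySem.Str.isIn ">" pair then
    let temp := (PySem.Str.split? pair ">").getD []
    pvStepA d (PySem.List.pyGetD temp 0 "") (PySem.List.pyGetD temp 1 "")
  else if PySem.Str.isIn "<" pair then
    let temp := (PySem.Str.split? pair "<").getD []
    pvStepA d (PySem.List.pyGetD temp 1 "") (PySem.List.pyGetD temp 0 "")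
  else d

def pvFB (acc : List (String × String)) (pair : String) : List (String × String) :=
  if PySem.Str.isIn ">" pair then
    let t := (PySem.Str.split? pair ">").getD []
    acc ++ [(PySem.List.pyGetD t 0 "", PySem.List.pyGetD t 1 "")]
  else if PySem.Str.isIn "<" pair then
    let t := (PySem.Str.split? pair "<").getD []
    acc ++ [(PySem.List.pyGetD t 1 "", PySem.List.pyGetD t 0 "")]
  else acc

theorem pvStepFR (dA : PySem.Dict String (List String)) (kvs : List (String × String))
    (pair : String) (h : pvR dA kvs) : pvR (pvFA dA pair) (pvFB kvs pair) := by
  unfold pvFA pvFB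
  by_cases hgt : PySem.Str.isIn ">" pair = true
  · rw [if_pos hgt, if_pos hgt]; exact pvStepR _ _ _ _ h
  · rw [if_neg hgt, if_neg hgt]
    by_cases hlt : PySem.Str.isIn "<" pair = true
    · rw [if_pos hlt, if_pos hlt]; exact pvStepR _ _ _ _ h
    · rw [if_neg hlt, if_neg hlt]; exact h

theorem pvLoopR (ps : List String) (dA : PySem.Dict String (List String))
    (kvs : List (String × String)) (h : pvR dA kvs) :
    pvR (ps.foldl pvFA dA) (ps.foldl pvFB kvs) := by
  induction ps generalizing dA kvs with
  | nil => exact h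
  | cons p ps ih => exact ih _ _ (pvStepFR dA kvs p h)

theorem pvA_eq (pairs : List String) :
    create_dictionary_from_directed_string_pairs pairs
      = if pairs = [] then [] else (pairs.foldl pvFA PySem.Dict.empty).items := rfl

theorem pvB_eq (pairs : List String) :
    create_dictionary_from_directed_string_pairs_alt pairs
      = (PySem.List.dedup ((pairs.foldl pvFB []).map Prod.fst)).map
          (fun k => (k, PySem.List.dedup
            (((pairs.foldl pvFB []).filter (fun p => p.1 == k)).map Prod.snd))) := rfl

-- ===== VERDICT (by name: the statement is the Claim_ definition above) =====
theorem create_dictionary_from_directed_string_pairs_spec : Claim_equal_create_dictionary_from_directed_string_pairs := by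
  intro pairs _
  unfold Spec_create_dictionary_from_directed_string_pairs
  rw [pvA_eq, pvB_eq]
  by_cases h0 : pairs = []
  · subst h0; rfl
  · rw [if_neg h0]
    obtain ⟨h1, h2⟩ : pvR (pairs.foldl pvFA PySem.Dict.empty) (pairs.foldl pvFB []) :=
      pvLoopR pairs _ _ ⟨rfl, fun k => rfl⟩
    have hnd : (pairs.foldl pvFA PySem.Dict.empty).keys.Nodup := by
      rw [h1]; exact PySem.List.nodup_dedup _
    rw [PySem.Dict.items_eq_map_keys _ hnd ([] : List String), h1]
    exact List.map_congr_left fun k _ => by rw [h2 k]
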